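-- pv_equiv track=rewrite | github.com/qshou-coder/HALO | data_annotator/src/label.py | find_action_segments_from_idle
-- ===== SOURCE A (Python) =====
-- def find_action_segments_from_idle(idle_flags, min_idle_frames=3):
--     """
--     Given per-frame idle flags, find all idle segments of length >= min_idle_frames
--     and return the action (non-idle) segments separated by them.
--     """
--     n = len(idle_flags)
--     if n == 0:
--         return []
--
--     # Step 1: find all contiguous idle runs
--     idle_segments = []
--     i = 0
--     while i < n:
--         if idle_flags[i]:
--             start = i
--             while i < n and idle_flags[i]:
--                 i += 1
--             end = i - 1
--             idle_segments.append((start, end))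
--         else:
--             i += 1
--
--     # Step 2: keep only idle runs with length >= min_idle_frames
--     long_idle_segments = [
--         (s, e) for s, e in idle_segments if (e - s + 1) >= min_idle_frames
--     ]
--
--     # If no sufficiently long idle run exists
--     if not long_idle_segments:
--         if all(idle_flags):
--             return []  # entirely idle
--         else:
--             return [(0, n - 1)]  # the whole sequence is one action segment
--
--     # Step 3: use the long idle runs as separators and extract action segments
--     action_segments = []
--
--     # Before the first long idle run
--     first_idle_start = long_idle_segments[0][0]
--     if first_idle_start > 0:
--         action_segments.append((0, first_idle_start - 1))
--
--     # Between consecutive long idle runs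
--     for i in range(len(long_idle_segments) - 1):
--         end_prev = long_idle_segments[i][1]
--         start_next = long_idle_segments[i + 1][0]
--         if start_next > end_prev + 1:
--             action_segments.append((end_prev + 1, start_next - 1))
--
--     # After the last long idle run
--     last_idle_end = long_idle_segments[-1][1]
--     if last_idle_end < n - 1:
--         action_segments.append((last_idle_end + 1, n - 1))
--
--     # Drop invalid (empty / inverted) segments
--     action_segments = [(s, e) for s, e in action_segments if s <= e]
--     return action_segments
-- ===== SOURCE B (Python) =====
-- def find_action_segments_from_idle(idle_flags, min_idle_frames=3):
--     # A fully idle (or empty) sequence has no action segments, even when it is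
--     # shorter than min_idle_frames.
--     if all(idle_flags):
--         return []
--     n = len(idle_flags)
--     segments = []
--     start = 0  # start of the current candidate action segment
--     i = 0
--     while i < n:
--         # advance j to the end of the maximal run of equal flags starting at i
--         j = i + 1
--         while j < n and idle_flags[j] == idle_flags[i]:
--             j += 1
--         if idle_flags[i] and j - i >= min_idle_frames:
--             # long idle run: it separates action segments
--             if start < i:
--                 segments.append((start, i - 1))
--             start = j
--         i = j
--     if start < n:
--         segments.append((start, n - 1))
--     return segments
-- ===== Notes on version B (the rewrite author's own statement) =====
-- stated objective: simpler
-- what changed: A finds all idle runs, filters the long ones, then stitches action segments out of head/between/tail gap cases plus a final validity filter; B is a single left-to-right pass over maximal runs of equal flags that emits an action segment whenever a long idle run (or the end) closes one, after an all-idle guard.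
import Mathlib
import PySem

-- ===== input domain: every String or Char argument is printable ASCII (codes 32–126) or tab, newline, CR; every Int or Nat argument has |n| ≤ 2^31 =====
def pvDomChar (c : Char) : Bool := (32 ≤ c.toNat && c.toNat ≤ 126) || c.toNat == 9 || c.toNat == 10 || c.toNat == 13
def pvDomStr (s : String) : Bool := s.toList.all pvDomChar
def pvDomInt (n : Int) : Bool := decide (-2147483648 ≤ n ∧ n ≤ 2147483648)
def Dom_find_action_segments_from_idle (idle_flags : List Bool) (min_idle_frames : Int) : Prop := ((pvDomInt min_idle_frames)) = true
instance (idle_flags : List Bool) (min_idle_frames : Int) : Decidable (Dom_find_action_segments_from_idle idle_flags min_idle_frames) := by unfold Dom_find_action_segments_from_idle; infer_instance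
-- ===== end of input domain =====

-- B replaces A's four-phase pipeline (collect idle runs, filter the long ones,
-- stitch prefix/between/suffix gaps, re-filter) with one left-to-right pass over
-- maximal runs that emits action segments directly; objective: simpler.

-- ===== PORT A =====
-- step 1 of A: the while-loop scan collecting maximal idle runs (s, e);
-- the Option carries the `start` of the idle run currently being scanned
def idleRunsA : List Bool → Int → Option Int → List (Int × Int)
  | [], _, none => []
  | [], i, some s => [(s, i - 1)]
  | b :: t, i, none =>
      if b then idleRunsA t (i + 1) (some i) else idleRunsA t (i + 1) none
  | b :: t, i, some s =>
      if b then idleRunsA t (i + 1) (some s) else (s, i - 1) :: idleRunsA t (i + 1) none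

-- A's `for i in range(len(long)-1)` loop over consecutive pairs of long idle runs
def betweenA : List (Int × Int) → List (Int × Int)
  | x :: y :: rest => (if y.1 > x.2 + 1 then [(x.2 + 1, y.1 - 1)] else []) ++ betweenA (y :: rest)
  | _ => []

def find_action_segments_from_idle (idle_flags : List Bool) (min_idle_frames : Int) : List (Int × Int) :=
  let n : Int := idle_flags.length
  if idle_flags.length = 0 then []
  else
    let idle_segments := idleRunsA idle_flags 0 none
    let long := idle_segments.filter (fun p => decide (p.2 - p.1 + 1 ≥ min_idle_frames))
    match long with
    | [] => if idle_flags.all (fun x => x) then [] else [(0, n - 1)]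
    | x :: xs =>
      let pre : List (Int × Int) := if x.1 > 0 then [((0 : Int), x.1 - 1)] else []
      let mid := betweenA (x :: xs)
      let lastE := ((x :: xs).getLast (List.cons_ne_nil x xs)).2
      let post : List (Int × Int) := if lastE < n - 1 then [(lastE + 1, n - 1)] else []
      List.filter (fun p => decide (p.1 ≤ p.2)) (pre ++ mid ++ post)

-- ===== PORT B =====
-- B's inner while: length of the maximal prefix of t equal to b, plus the rest
def runLenB (b : Bool) : List Bool → Nat × List Bool
  | [] => (0, [])
  | c :: rest => if c == b then ((runLenB b rest).1 + 1, (runLenB b rest).2) else (0, c :: rest)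

theorem runLenB_length_le (b : Bool) : ∀ t : List Bool, (runLenB b t).2.length ≤ t.length := by
  intro t
  induction t with
  | nil => simp [runLenB]
  | cons c rest ih =>
      by_cases h : c == b <;> simp [runLenB, h] <;> omega

-- B's outer while loop: one maximal run per iteration; `i` is the current index,
-- `start` the start of the current candidate action segment
def segsB (m : Int) : List Bool → Int → Int → List (Int × Int)
  | [], i, start => if start < i then [(start, i - 1)] else []
  | b :: t, i, start =>
      let p := runLenB b t
      let j : Int := i + (p.1 : Int) + 1
      if b && decide (((p.1 : Int) + 1) ≥ m) then
        (if start < i then [(start, i - 1)] else []) ++ segsB m p.2 j j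
      else segsB m p.2 j start
  termination_by l _ _ => l.length
  decreasing_by all_goals simp; exact runLenB_length_le b t

def find_action_segments_from_idle_alt (idle_flags : List Bool) (min_idle_frames : Int) : List (Int × Int) :=
  if idle_flags.all (fun x => x) then [] else segsB min_idle_frames idle_flags 0 0

-- ===== PRECONDITION & SPEC =====
def Spec_find_action_segments_from_idle (idle_flags : List Bool) (min_idle_frames : Int) (out : List (Int × Int)) : Prop := out = find_action_segments_from_idle_alt idle_flags min_idle_frames
instance (idle_flags : List Bool) (min_idle_frames : Int) (out : List (Int × Int)) : Decidable (Spec_find_action_segments_from_idle idle_flags min_idle_frames out) := by unfold Spec_find_action_segments_from_idle; infer_instance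

-- ===== CLAIM (what is proved, stated in full; the proofs are below) =====
def Claim_equal_find_action_segments_from_idle : Prop := ∀ (idle_flags : List Bool) (min_idle_frames : Int), Dom_find_action_segments_from_idle idle_flags min_idle_frames → Spec_find_action_segments_from_idle idle_flags min_idle_frames (find_action_segments_from_idle idle_flags min_idle_frames)

-- ===== LEMMAS AND PROOFS =====

-- common normal form: the gaps of [st, n-1] left by a sorted interval list
def stitchFrom (st n : Int) : List (Int × Int) → List (Int × Int)
  | [] => if st ≤ n - 1 then [(st, n - 1)] else []
  | x :: rest => (if st ≤ x.1 - 1 then [(st, x.1 - 1)] else []) ++ stitchFrom (x.2 + 1) n rest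

theorem runLenB_split (b : Bool) : ∀ t : List Bool, (runLenB b t).1 + (runLenB b t).2.length = t.length := by
  intro t
  induction t with
  | nil => simp [runLenB]
  | cons c rest ih => by_cases h : c == b <;> simp [runLenB, h] <;> omega

theorem idleRunsA_congr (r : List Bool) (o : Option Int) {a a' : Int} (h : a = a') :
    idleRunsA r a o = idleRunsA r a' o := by rw [h]

theorem runLenB_cons_eq (b : Bool) (t : List Bool) :
    runLenB b (b :: t) = ((runLenB b t).1 + 1, (runLenB b t).2) := by
  simp [runLenB]

theorem idleRuns_some (t : List Bool) : ∀ (i s : Int),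
    idleRunsA t i (some s)
      = (s, i + ((runLenB true t).1 : Int) - 1) :: idleRunsA (runLenB true t).2 (i + ((runLenB true t).1 : Int)) none := by
  induction t with
  | nil => intro i s; simp [idleRunsA, runLenB]
  | cons c rest ih =>
      intro i s
      cases c with
      | true =>
          have red : idleRunsA (true :: rest) i (some s) = idleRunsA rest (i + 1) (some s) := by
            simp [idleRunsA]
          rw [red, ih, runLenB_cons_eq]
          have e1 : i + 1 + ((runLenB true rest).1 : Int) - 1
              = i + (((runLenB true rest).1 + 1 : Nat) : Int) - 1 := by push_cast; ring
          have e2 : i + 1 + ((runLenB true rest).1 : Int)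
              = i + (((runLenB true rest).1 + 1 : Nat) : Int) := by push_cast; ring
          rw [e1, e2]
      | false =>
          simp [idleRunsA, runLenB]

theorem idleRuns_none_false (t : List Bool) : ∀ (i : Int),
    idleRunsA t i none = idleRunsA (runLenB false t).2 (i + ((runLenB false t).1 : Int)) none := by
  induction t with
  | nil => intro i; simp [runLenB]
  | cons c rest ih =>
      intro i
      cases c with
      | true => simp [runLenB]
      | false =>
          have red : idleRunsA (false :: rest) i none = idleRunsA rest (i + 1) none := by
            simp [idleRunsA]
          rw [red, ih, runLenB_cons_eq]
          exact idleRunsA_congr _ _ (by push_cast; ring)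

theorem idleRuns_step (b : Bool) (t : List Bool) (i : Int) :
    idleRunsA (b :: t) i none
      = (if b then [(i, i + ((runLenB b t).1 : Int))] else [])
        ++ idleRunsA (runLenB b t).2 (i + ((runLenB b t).1 : Int) + 1) none := by
  cases b with
  | true =>
      have red : idleRunsA (true :: t) i none = idleRunsA t (i + 1) (some i) := by
        simp [idleRunsA]
      rw [red, idleRuns_some]
      rw [if_pos (rfl : true = true), List.singleton_append]
      have e1 : i + 1 + ((runLenB true t).1 : Int) - 1 = i + ((runLenB true t).1 : Int) := by ring
      rw [e1]
      have e2 : i + 1 + ((runLenB true t).1 : Int) = i + ((runLenB true t).1 : Int) + 1 := by ring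
      rw [e2]
  | false =>
      have red : idleRunsA (false :: t) i none = idleRunsA t (i + 1) none := by
        simp [idleRunsA]
      rw [red, idleRuns_none_false t (i + 1)]
      have : (if false = true then [((i : Int), i + ((runLenB false t).1 : Int))] else [])
          = ([] : List (Int × Int)) := by simp
      rw [this, List.nil_append]
      exact idleRunsA_congr _ _ (by push_cast; ring)

-- B's single pass equals stitching the gaps of the filtered idle runs
theorem segsB_stitch (m : Int) : ∀ (fuel : Nat) (l : List Bool) (i start : Int), l.length ≤ fuel →
    segsB m l i start
      = stitchFrom start (i + (l.length : Int))
          (List.filter (fun p => decide (p.2 - p.1 + 1 ≥ m)) (idleRunsA l i none)) := by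
  intro fuel
  induction fuel with
  | zero =>
      intro l i start hl
      have hnil : l = [] := List.eq_nil_of_length_eq_zero (Nat.le_zero.mp hl)
      subst hnil
      simp only [segsB, idleRunsA, List.filter_nil, stitchFrom, List.length_nil, Int.natCast_zero,
        add_zero]
      exact if_congr (by omega) rfl rfl
  | succ fu ih =>
      intro l i start hl
      cases l with
      | nil =>
          simp only [segsB, idleRunsA, List.filter_nil, stitchFrom, List.length_nil,
            Int.natCast_zero, add_zero]
          exact if_congr (by omega) rfl rfl
      | cons b t =>
          have hsplit := runLenB_split b t
          have hlen : (runLenB b t).2.length ≤ fu := by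
            have := runLenB_length_le b t
            simp at hl; omega
          have hn : i + ((b :: t).length : Int)
              = (i + ((runLenB b t).1 : Int) + 1) + ((runLenB b t).2.length : Int) := by
            simp only [List.length_cons]
            push_cast [← hsplit]
            ring
          rw [idleRuns_step]
          cases b with
          | false =>
              have hg : ¬ ((false && decide (((runLenB false t).1 : Int) + 1 ≥ m)) = true) := by
                simp
              simp only [segsB]
              rw [if_neg hg, if_neg (by simp : ¬ (false = true)), List.nil_append]
              rw [ih _ _ _ hlen, hn]
          | true =>
              simp only [segsB]
              simp only [if_true, eq_self_iff_true, List.singleton_append, List.filter_cons]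
              by_cases hm : ((runLenB true t).1 : Int) + 1 ≥ m
              · have hg : (true && decide (((runLenB true t).1 : Int) + 1 ≥ m)) = true := by
                  rw [Bool.true_and, decide_eq_true_eq]; exact hm
                have hf : (decide ((i + ((runLenB true t).1 : Int)) - i + 1 ≥ m)) = true := by
                  rw [decide_eq_true_eq]; omega
                rw [if_pos hg, if_pos hf]
                rw [ih _ _ _ hlen, hn]
                rw [show ∀ (L : List (Int × Int)),
                      stitchFrom start ((i + ((runLenB true t).1 : Int) + 1) + ((runLenB true t).2.length : Int))
                        ((i, i + ((runLenB true t).1 : Int)) :: L)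
                      = (if start ≤ i - 1 then [(start, i - 1)] else [])
                        ++ stitchFrom (i + ((runLenB true t).1 : Int) + 1)
                            ((i + ((runLenB true t).1 : Int) + 1) + ((runLenB true t).2.length : Int)) L
                    from fun L => rfl]
                congr 1
                exact if_congr (by omega) rfl rfl
              · have hg : ¬ ((true && decide (((runLenB true t).1 : Int) + 1 ≥ m)) = true) := by
                  rw [Bool.true_and, decide_eq_true_eq]; exact hm
                have hf : ¬ ((decide ((i + ((runLenB true t).1 : Int)) - i + 1 ≥ m)) = true) := by
                  rw [decide_eq_true_eq]; omega
                rw [if_neg hg, if_neg hf]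
                rw [ih _ _ _ hlen, hn]

-- A's pre/between/post stitching equals stitchFrom
theorem betweenA_stitch : ∀ (xs : List (Int × Int)) (x : Int × Int) (st n : Int),
    (if x.1 > st then [(st, x.1 - 1)] else []) ++ betweenA (x :: xs)
      ++ (if (((x :: xs).getLast (List.cons_ne_nil x xs)).2) < n - 1
            then [((((x :: xs).getLast (List.cons_ne_nil x xs)).2) + 1, n - 1)] else [])
    = stitchFrom st n (x :: xs) := by
  intro xs
  induction xs with
  | nil =>
      intro x st n
      show _ = (if st ≤ x.1 - 1 then [(st, x.1 - 1)] else []) ++ stitchFrom (x.2 + 1) n []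
      rw [show betweenA [x] = [] from rfl,
          show stitchFrom (x.2 + 1) n [] = (if x.2 + 1 ≤ n - 1 then [(x.2 + 1, n - 1)] else []) from rfl,
          show ([x].getLast (List.cons_ne_nil x [])) = x from rfl]
      rw [if_congr (show (x.1 > st) ↔ (st ≤ x.1 - 1) by omega) rfl rfl,
          if_congr (show (x.2 < n - 1) ↔ (x.2 + 1 ≤ n - 1) by omega) rfl rfl]
      simp
  | cons y ys ih =>
      intro x st n
      show _ = (if st ≤ x.1 - 1 then [(st, x.1 - 1)] else []) ++ stitchFrom (x.2 + 1) n (y :: ys)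
      rw [← ih y (x.2 + 1) n]
      rw [show betweenA (x :: y :: ys)
            = (if y.1 > x.2 + 1 then [(x.2 + 1, y.1 - 1)] else []) ++ betweenA (y :: ys) from rfl]
      have hlast : (x :: y :: ys).getLast (List.cons_ne_nil x (y :: ys))
          = (y :: ys).getLast (List.cons_ne_nil y ys) := List.getLast_cons _
      rw [hlast,
          if_congr (show (x.1 > st) ↔ (st ≤ x.1 - 1) by omega) rfl rfl]
      simp only [List.append_assoc]

theorem betweenA_valid : ∀ (L : List (Int × Int)) (p : Int × Int), p ∈ betweenA L → p.1 ≤ p.2 := by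
  intro L
  induction L with
  | nil => intro p hp; simp [betweenA] at hp
  | cons x xs ih =>
      intro p hp
      cases xs with
      | nil => simp [betweenA] at hp
      | cons y ys =>
          simp only [betweenA, List.mem_append] at hp
          rcases hp with hp | hp
          · split_ifs at hp with h
            · simp only [List.mem_singleton] at hp
              subst hp
              simp only
              omega
            · simp at hp
          · exact ih p hp

theorem runLenB_all_true : ∀ t : List Bool, (∀ x ∈ t, x = true) → runLenB true t = (t.length, []) := by
  intro t
  induction t with
  | nil => intro _; simp [runLenB]
  | cons c rest ih =>
      intro h
      have hc : c = true := h c (by simp)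
      subst hc
      simp [runLenB, ih (fun x hx => h x (by simp [hx]))]

theorem idleRuns_all_true (l : List Bool) (h : l.all (fun x => x) = true) (hne : l ≠ []) :
    idleRunsA l 0 none = [(0, (l.length : Int) - 1)] := by
  cases l with
  | nil => exact absurd rfl hne
  | cons b t =>
      simp only [List.all_cons, Bool.and_eq_true] at h
      obtain ⟨hb, ht⟩ := h
      subst hb
      rw [idleRuns_step]
      rw [runLenB_all_true t (by simpa [List.all_eq_true] using ht)]
      rw [show idleRunsA [] ((0 : Int) + (t.length : Int) + 1) none = [] from rfl]
      rw [if_pos (rfl : true = true), List.append_nil, List.length_cons]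
      have : (0 : Int) + (t.length : Int) = ((t.length + 1 : Nat) : Int) - 1 := by push_cast; ring
      rw [this]

-- the port of A with its local let-bindings unfolded (definitional)
theorem A_eq (l : List Bool) (m : Int) :
    find_action_segments_from_idle l m =
      if l.length = 0 then [] else
      match List.filter (fun p => decide (p.2 - p.1 + 1 ≥ m)) (idleRunsA l 0 none) with
      | [] => if l.all (fun x => x) = true then [] else [((0 : Int), (l.length : Int) - 1)]
      | x :: xs =>
          List.filter (fun p => decide (p.1 ≤ p.2))
            ((if x.1 > 0 then [((0 : Int), x.1 - 1)] else []) ++ betweenA (x :: xs)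
              ++ (if ((x :: xs).getLast (List.cons_ne_nil x xs)).2 < (l.length : Int) - 1
                    then [(((x :: xs).getLast (List.cons_ne_nil x xs)).2 + 1, (l.length : Int) - 1)]
                    else [])) := rfl

-- ===== VERDICT (by name: the statement is the Claim_ definition above) =====
theorem find_action_segments_from_idle_spec : Claim_equal_find_action_segments_from_idle := by
  intro l m _
  unfold Spec_find_action_segments_from_idle
  rw [A_eq]
  unfold find_action_segments_from_idle_alt
  by_cases hall : l.all (fun x => x) = true
  · -- entirely idle (or empty): both sides are []
    conv_rhs => rw [if_pos hall]
    by_cases hnil : l.length = 0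
    · rw [if_pos hnil]
    · rw [if_neg hnil]
      have hne : l ≠ [] := fun h => hnil (by simp [h])
      rw [idleRuns_all_true l hall hne]
      by_cases hm : ((l.length : Int) - 1) - 0 + 1 ≥ m
      · have hf : (decide (((l.length : Int) - 1) - 0 + 1 ≥ m)) = true := by
          rw [decide_eq_true_eq]; exact hm
        rw [List.filter_cons, if_pos hf, List.filter_nil]
        show List.filter (fun p => decide (p.1 ≤ p.2))
            ((if (0 : Int) > 0 then [((0 : Int), (0 : Int) - 1)] else [])
              ++ betweenA [((0 : Int), (l.length : Int) - 1)]
              ++ (if ([((0 : Int), (l.length : Int) - 1)].getLast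
                      (List.cons_ne_nil _ _)).2 < (l.length : Int) - 1
                    then [(([((0 : Int), (l.length : Int) - 1)].getLast
                      (List.cons_ne_nil _ _)).2 + 1, (l.length : Int) - 1)] else []))
            = []
        rw [show betweenA [((0 : Int), (l.length : Int) - 1)] = [] from rfl,
            if_neg (by omega : ¬ ((0 : Int) > 0)),
            if_neg (by simp : ¬ (([((0 : Int), (l.length : Int) - 1)].getLast
              (List.cons_ne_nil _ _)).2 < (l.length : Int) - 1))]
        rfl
      · have hf : ¬ ((decide (((l.length : Int) - 1) - 0 + 1 ≥ m)) = true) := by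
          rw [decide_eq_true_eq]; exact hm
        rw [List.filter_cons, if_neg hf, List.filter_nil]
        show (if (l.all fun x => x) = true then [] else [((0 : Int), (l.length : Int) - 1)]) = []
        rw [if_pos hall]
  · -- there is a non-idle frame
    conv_rhs => rw [if_neg hall]
    have hne : l ≠ [] := fun h => hall (by simp [h])
    have hnil : ¬ (l.length = 0) := by simpa using hne
    have hlen1 : (1 : Int) ≤ (l.length : Int) := by
      have : l.length ≠ 0 := hnil
      omega
    rw [if_neg hnil, segsB_stitch m l.length l 0 0 (le_refl _), zero_add]
    cases hL : List.filter (fun p => decide (p.2 - p.1 + 1 ≥ m)) (idleRunsA l 0 none) with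
    | nil =>
        show (if (l.all fun x => x) = true then [] else [((0 : Int), (l.length : Int) - 1)])
            = stitchFrom 0 (l.length : Int) []
        rw [if_neg hall,
            show stitchFrom 0 (l.length : Int) []
              = (if (0 : Int) ≤ (l.length : Int) - 1 then [((0 : Int), (l.length : Int) - 1)] else [])
              from rfl,
            if_pos (by omega : (0 : Int) ≤ (l.length : Int) - 1)]
    | cons x xs =>
        show List.filter (fun p => decide (p.1 ≤ p.2))
            ((if x.1 > 0 then [((0 : Int), x.1 - 1)] else []) ++ betweenA (x :: xs)
              ++ (if ((x :: xs).getLast (List.cons_ne_nil x xs)).2 < (l.length : Int) - 1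
                    then [(((x :: xs).getLast (List.cons_ne_nil x xs)).2 + 1, (l.length : Int) - 1)]
                    else []))
            = stitchFrom 0 (l.length : Int) (x :: xs)
        rw [List.filter_eq_self.mpr, betweenA_stitch xs x 0 (l.length : Int)]
        intro p hp
        simp only [List.append_assoc, List.mem_append] at hp
        rcases hp with hp | hp | hp
        · split_ifs at hp with h
          · simp only [List.mem_singleton] at hp
            subst hp
            simp only [decide_eq_true_eq]
            omega
          · simp at hp
        · have := betweenA_valid (x :: xs) p hp
          simp only [decide_eq_true_eq]
          omega
        · split_ifs at hp with h
          · simp only [List.mem_singleton] at hp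
            subst hp
            simp only [decide_eq_true_eq]
            omega
          · simp at hp
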